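-- pv_equiv track=rewrite | github.com/BelgacemS/competitive-foraging | src/tournoi.py | appliquer_contrainte_physique
-- ===== SOURCE A (Python) =====
-- def appliquer_contrainte_physique(alloc, max_par_fiole=8):
--     # simule la contrainte du vrai jeu : max 8 joueurs par fiole
--     # le surplus est redistribue sur les fioles les moins chargees
--     alloc = list(alloc)
--     surplus = 0
--     for i in range(len(alloc)):
--         if alloc[i] > max_par_fiole:
--             surplus += alloc[i] - max_par_fiole
--             alloc[i] = max_par_fiole
--
--     # redistribuer le surplus sur les fioles qui ont de la place
--     while surplus > 0:
--         min_idx = min(range(len(alloc)), key=lambda i: alloc[i])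
--         ajout = min(surplus, max_par_fiole - alloc[min_idx])
--         if ajout <= 0:
--             break
--         alloc[min_idx] += ajout
--         surplus -= ajout
--
--     return tuple(alloc)
-- ===== SOURCE B (Python) =====
-- def appliquer_contrainte_physique(alloc, max_par_fiole=8):
--     # One pass to cap and collect surplus, then one sort: fill bins to max
--     # in (value, index) order until the surplus is exhausted.
--     capped = [min(x, max_par_fiole) for x in alloc]
--     surplus = sum(x - max_par_fiole for x in alloc if x > max_par_fiole)
--     for i in sorted(range(len(capped)), key=lambda i: (capped[i], i)):
--         if surplus <= 0:
--             break
--         ajout = min(surplus, max_par_fiole - capped[i])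
--         if ajout <= 0:
--             break
--         capped[i] += ajout
--         surplus -= ajout
--     return tuple(capped)
-- ===== Notes on version B (the rewrite author's own statement) =====
-- stated objective: faster
-- what changed: A rescans the whole list with min() on every redistribution round (each round fills one bin); B caps in one pass and sorts the indices once by (value, index), then fills bins to max in that order, exploiting that A always fills the current least-loaded bin completely.
import Mathlib
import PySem

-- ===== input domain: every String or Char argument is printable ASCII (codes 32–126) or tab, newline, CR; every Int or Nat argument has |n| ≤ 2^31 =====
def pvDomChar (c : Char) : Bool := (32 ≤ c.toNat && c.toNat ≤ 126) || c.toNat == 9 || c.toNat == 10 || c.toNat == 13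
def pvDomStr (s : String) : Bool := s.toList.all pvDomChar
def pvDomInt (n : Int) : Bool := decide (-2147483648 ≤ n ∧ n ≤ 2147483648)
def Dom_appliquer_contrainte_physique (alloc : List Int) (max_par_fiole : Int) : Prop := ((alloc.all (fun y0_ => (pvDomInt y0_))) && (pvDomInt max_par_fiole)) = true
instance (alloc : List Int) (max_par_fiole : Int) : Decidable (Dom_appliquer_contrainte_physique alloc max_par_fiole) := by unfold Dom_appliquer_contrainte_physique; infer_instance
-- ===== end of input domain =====

-- B replaces A's quadratic repeated argmin scan by one sort of the indices by (value, index),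
-- filling bins to max in that order — same results, O(n log n) instead of O(n^2).

-- ===== PORT A =====
-- the capping for-loop: state (alloc, surplus), one step per index i
def pvCapA (M : Int) (st : List Int × Int) (i : Int) : List Int × Int :=
  if PySem.List.pyGetD st.1 i 0 > M then
    (PySem.List.pySetD st.1 i M, st.2 + (PySem.List.pyGetD st.1 i 0 - M))
  else st

-- the redistribution while-loop; terminates because surplus strictly decreases.
-- `none` branch = empty range (min() would raise); unreachable from the entry, where surplus = 0 then.
def pvLoopA (M : Int) (alloc : List Int) (surplus : Int) : List Int :=
  if hs : surplus > 0 then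
    match PySem.List.min? (PySem.List.pyRange 0 alloc.length 1) (fun i => PySem.List.pyGetD alloc i 0) with
    | none => alloc
    | some m =>
      let ajout := min surplus (M - PySem.List.pyGetD alloc m 0)
      if ha : ajout ≤ 0 then alloc
      else pvLoopA M (PySem.List.pySetD alloc m (PySem.List.pyGetD alloc m 0 + ajout)) (surplus - ajout)
  else alloc
termination_by surplus.toNat
decreasing_by omega

def appliquer_contrainte_physique (alloc : List Int) (max_par_fiole : Int) : List Int :=
  let st := (PySem.List.pyRange 0 alloc.length 1).foldl (pvCapA max_par_fiole) (alloc, 0)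
  pvLoopA max_par_fiole st.1 st.2

-- ===== PORT B =====
-- the for-loop over the sorted index list, with its two breaks
def pvLoopB (M : Int) (order : List Int) (capped : List Int) (surplus : Int) : List Int :=
  match order with
  | [] => capped
  | i :: rest =>
    if surplus ≤ 0 then capped
    else
      let ajout := min surplus (M - PySem.List.pyGetD capped i 0)
      if ajout ≤ 0 then capped
      else pvLoopB M rest (PySem.List.pySetD capped i (PySem.List.pyGetD capped i 0 + ajout)) (surplus - ajout)

def appliquer_contrainte_physique_alt (alloc : List Int) (max_par_fiole : Int) : List Int :=
  let capped := alloc.map (fun x => min x max_par_fiole)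
  let surplus := ((alloc.filter (fun x => decide (max_par_fiole < x))).map (fun x => x - max_par_fiole)).sum
  pvLoopB max_par_fiole
    (PySem.List.sorted2 (PySem.List.pyRange 0 capped.length 1)
      (fun i => PySem.List.pyGetD capped i 0) (fun i => i))
    capped surplus

-- ===== PRECONDITION & SPEC =====
def Spec_appliquer_contrainte_physique (alloc : List Int) (max_par_fiole : Int) (out : List Int) : Prop := out = appliquer_contrainte_physique_alt alloc max_par_fiole
instance (alloc : List Int) (max_par_fiole : Int) (out : List Int) : Decidable (Spec_appliquer_contrainte_physique alloc max_par_fiole out) := by unfold Spec_appliquer_contrainte_physique; infer_instance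

-- ===== CLAIM (what is proved, stated in full; the proofs are below) =====
def Claim_equal_appliquer_contrainte_physique : Prop := ∀ (alloc : List Int) (max_par_fiole : Int), Dom_appliquer_contrainte_physique alloc max_par_fiole → Spec_appliquer_contrainte_physique alloc max_par_fiole (appliquer_contrainte_physique alloc max_par_fiole)

-- ===== LEMMAS AND PROOFS =====

-- weak lexicographic order on indices by (key value, index)
def pvLex (key : Int → Int) (a b : Int) : Prop := key a < key b ∨ (key a = key b ∧ a ≤ b)

theorem pvLoopB_nonpos (M : Int) (order capped : List Int) (surplus : Int)
    (h : surplus ≤ 0) : pvLoopB M order capped surplus = capped := by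
  cases order with
  | nil => rfl
  | cons i rest => simp [pvLoopB, h]

-- integer-index get-after-set
theorem pvGetSet (xs : List Int) (i j v : Int) (h0 : 0 ≤ i) (hi : i < (xs.length : Int))
    (h0' : 0 ≤ j) :
    PySem.List.pyGetD (PySem.List.pySetD xs i v) j 0 = if j = i then v else PySem.List.pyGetD xs j 0 := by
  have hi' : i = ((i.toNat : Nat) : Int) := by omega
  have hj' : j = ((j.toNat : Nat) : Int) := by omega
  rw [hi', hj', PySem.List.pyGetD_pySetD_natCast xs i.toNat j.toNat v 0 (by omega)]
  by_cases h : j.toNat = i.toNat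
  · simp [h]
  · rw [if_neg h, if_neg (by omega : ¬ ((j.toNat : Nat) : Int) = ((i.toNat : Nat) : Int))]

-- the insertion-sort comparator of sorted2 with keys (key ·, id)
def pvBefore (key : Int → Int) (a b : Int) : Bool :=
  decide (key a < key b) || (!decide (key b < key a) && decide (a < b))

theorem pvInsertBy_pairwise (key : Int → Int) (x : Int) (ys : List Int)
    (h : ys.Pairwise (pvLex key)) :
    (PySem.List.insertBy (pvBefore key) x ys).Pairwise (pvLex key) := by
  induction ys with
  | nil => simp [PySem.List.insertBy, pvLex]
  | cons y ys ih =>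
    rw [List.pairwise_cons] at h
    obtain ⟨hy, hys⟩ := h
    by_cases hb : pvBefore key x y = true
    · rw [show PySem.List.insertBy (pvBefore key) x (y :: ys) = x :: y :: ys by
        simp [PySem.List.insertBy, hb]]
      refine List.Pairwise.cons ?_ (List.Pairwise.cons hy hys)
      intro z hz
      rw [List.mem_cons] at hz
      have hxy : pvLex key x y := by
        unfold pvBefore at hb; unfold pvLex
        simp only [Bool.or_eq_true, Bool.and_eq_true, Bool.not_eq_true', decide_eq_true_eq,
          decide_eq_false_iff_not] at hb
        omega
      rcases hz with hz | hz
      · subst hz; exact hxy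
      · have hyz := hy z hz
        unfold pvLex at hxy hyz ⊢; omega
    · rw [show PySem.List.insertBy (pvBefore key) x (y :: ys)
            = y :: PySem.List.insertBy (pvBefore key) x ys by
        simp [PySem.List.insertBy, hb]]
      refine List.Pairwise.cons ?_ (ih hys)
      intro z hz
      rw [PySem.List.insertBy_mem_iff] at hz
      rcases hz with hz | hz
      · subst hz
        unfold pvBefore at hb
        simp only [Bool.or_eq_true, Bool.and_eq_true, Bool.not_eq_true', decide_eq_true_eq,
          decide_eq_false_iff_not, not_or, not_and] at hb
        unfold pvLex; omega
      · exact hy z hz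

theorem pvFoldl_insertBy_pairwise (key : Int → Int) (xs acc : List Int)
    (h : acc.Pairwise (pvLex key)) :
    (xs.foldl (fun acc x => PySem.List.insertBy (pvBefore key) x acc) acc).Pairwise (pvLex key) := by
  induction xs generalizing acc with
  | nil => exact h
  | cons x xs ih => exact ih _ (pvInsertBy_pairwise key x acc h)

theorem pvSorted2_pairwise (key : Int → Int) (xs : List Int) :
    (PySem.List.sorted2 xs key (fun i => i) false).Pairwise (pvLex key) := by
  have : PySem.List.sorted2 xs key (fun i => i) false
      = xs.foldl (fun acc x => PySem.List.insertBy (pvBefore key) x acc) [] := by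
    rfl
  rw [this]
  exact pvFoldl_insertBy_pairwise key xs [] (List.Pairwise.nil)

def pvMinStep (key : Int → Int) (acc : Option Int) (x : Int) : Option Int :=
  match acc with
  | none => some x
  | some m => if key x < key m then some x else some m

theorem pvMin?_eq (key : Int → Int) (l : List Int) :
    PySem.List.min? l key = l.foldl (pvMinStep key) none := by
  unfold PySem.List.min?
  congr 1
  funext acc x
  cases acc <;> rfl

-- min? returns the FIRST minimal element: on a strictly increasing list, the minimal
-- element that is strictly below every earlier minimal candidate
theorem pvMinFold_stay (key : Int → Int) (t : List Int) (m : Int)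
    (h : ∀ j ∈ t, ¬ key j < key m) :
    t.foldl (pvMinStep key) (some m) = some m := by
  induction t with
  | nil => rfl
  | cons j t ih =>
    simp only [List.foldl_cons, pvMinStep]
    rw [if_neg (h j (List.mem_cons_self))]
    exact ih (fun j hj => h j (List.mem_cons_of_mem _ hj))

theorem pvMin?_first (key : Int → Int) (l : List Int) (h : Int)
    (hpair : l.Pairwise (fun a b => a < b)) (hmem : h ∈ l)
    (hmin : ∀ j ∈ l, key h ≤ key j)
    (hstrict : ∀ j ∈ l, j < h → key h < key j) :
    PySem.List.min? l key = some h := by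
  rw [pvMin?_eq]
  obtain ⟨pre, suf, rfl⟩ := List.append_of_mem hmem
  rw [List.pairwise_append] at hpair
  obtain ⟨hpre, hsuf, hcross⟩ := hpair
  have hstep : ∀ acc : Option Int, (∀ m, acc = some m → key h < key m) →
      (pre ++ h :: suf).foldl (pvMinStep key) acc = some h := by
    intro acc hacc
    rw [List.foldl_append]
    have hpreacc : ∀ m, pre.foldl (pvMinStep key) acc = some m → key h < key m := by
      intro m hm
      -- the fold over pre yields either acc or an element of pre
      have : ∀ (p : List Int) (a : Option Int), (∀ m', a = some m' → key h < key m') →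
          (∀ j ∈ p, key h < key j) →
          ∀ m', p.foldl (pvMinStep key) a = some m' → key h < key m' := by
        intro p
        induction p with
        | nil => intro a ha _ m' hm'; exact ha m' hm'
        | cons x p ih =>
          intro a ha hp m' hm'
          rw [List.foldl_cons] at hm'
          cases a with
          | none =>
            simp only [pvMinStep] at hm'
            exact ih (some x) (fun m'' hm'' => by cases hm''; exact hp x List.mem_cons_self)
              (fun j hj => hp j (List.mem_cons_of_mem _ hj)) m' hm'
          | some a0 =>
            simp only [pvMinStep] at hm'
            by_cases hc : key x < key a0
            · rw [if_pos hc] at hm'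
              exact ih (some x) (fun m'' hm'' => by cases hm''; exact hp x List.mem_cons_self)
                (fun j hj => hp j (List.mem_cons_of_mem _ hj)) m' hm'
            · rw [if_neg hc] at hm'
              exact ih (some a0) (fun m'' hm'' => by cases hm''; exact ha a0 rfl)
                (fun j hj => hp j (List.mem_cons_of_mem _ hj)) m' hm'
      exact this pre acc hacc
        (fun j hj => hstrict j (List.mem_append_left _ hj) (hcross j hj h List.mem_cons_self)) m hm
    cases hacc' : pre.foldl (pvMinStep key) acc with
    | none =>
      simp only [List.foldl_cons, pvMinStep]
      exact pvMinFold_stay key suf h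
        (fun j hj => not_lt.mpr (hmin j (List.mem_append_right _ (List.mem_cons_of_mem _ hj))))
    | some m =>
      simp only [List.foldl_cons, pvMinStep]
      rw [if_pos (hpreacc m hacc')]
      exact pvMinFold_stay key suf h
        (fun j hj => not_lt.mpr (hmin j (List.mem_append_right _ (List.mem_cons_of_mem _ hj))))
  exact hstep none (by intro m hm; cases hm)

-- the main loop correspondence
theorem pvLoop_eq (M : Int) (order : List Int) : ∀ (alloc : List Int) (surplus : Int),
    (∀ i ∈ order, 0 ≤ i ∧ i < (alloc.length : Int)) →
    order.Nodup →
    order.Pairwise (pvLex (fun i => PySem.List.pyGetD alloc i 0)) →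
    (∀ j : Int, 0 ≤ j → j < (alloc.length : Int) → j ∉ order → PySem.List.pyGetD alloc j 0 = M) →
    (∀ i : Int, 0 ≤ i → i < (alloc.length : Int) → PySem.List.pyGetD alloc i 0 ≤ M) →
    pvLoopA M alloc surplus = pvLoopB M order alloc surplus := by
  induction order with
  | nil =>
    intro alloc surplus H1 H2 H3 H4 H5
    show pvLoopA M alloc surplus = alloc
    rw [pvLoopA]
    by_cases hs : surplus > 0
    · rw [dif_pos hs]
      cases hm : PySem.List.min? (PySem.List.pyRange 0 alloc.length 1)
          (fun i => PySem.List.pyGetD alloc i 0) with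
      | none => rfl
      | some m =>
        have hmem := PySem.List.min?_mem hm
        rw [PySem.List.mem_pyRange_one] at hmem
        have hM : PySem.List.pyGetD alloc m 0 = M :=
          H4 m hmem.1 hmem.2 (List.not_mem_nil)
        dsimp only
        rw [hM, dif_pos (by omega : min surplus (M - M) ≤ 0)]
    · rw [dif_neg hs]
  | cons h rest ih =>
    intro alloc surplus H1 H2 H3 H4 H5
    have hh := H1 h List.mem_cons_self
    by_cases hs : surplus ≤ 0
    · rw [pvLoopA, dif_neg (by omega), pvLoopB, if_pos hs]
    · have hs' : surplus > 0 := by omega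
      rw [List.pairwise_cons] at H3
      obtain ⟨Hhead, Hrest⟩ := H3
      rw [List.nodup_cons] at H2
      obtain ⟨hnotin, Hnodup⟩ := H2
      set v0 := PySem.List.pyGetD alloc h 0 with hv0
      -- every index is h, in rest, or outside order; its value relates to v0
      have hval : ∀ j : Int, 0 ≤ j → j < (alloc.length : Int) → v0 ≤ PySem.List.pyGetD alloc j 0 := by
        intro j hj0 hjn
        by_cases hjh : j = h
        · subst hjh; omega
        · by_cases hjr : j ∈ rest
          · have := Hhead j hjr; unfold pvLex at this; dsimp only at this; omega
          · rw [H4 j hj0 hjn (by simp [hjh, hjr])]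
            exact H5 h hh.1 hh.2
      by_cases hv : v0 < M
      · -- min? picks h: first index with minimal value
        have hmin : PySem.List.min? (PySem.List.pyRange 0 alloc.length 1)
            (fun i => PySem.List.pyGetD alloc i 0) = some h := by
          apply pvMin?_first
          · exact PySem.List.pairwise_lt_pyRange_one 0 (alloc.length : Int)
          · rw [PySem.List.mem_pyRange_one]; exact ⟨hh.1, hh.2⟩
          · intro j hj; rw [PySem.List.mem_pyRange_one] at hj
            exact hval j hj.1 hj.2
          · intro j hj hjh; rw [PySem.List.mem_pyRange_one] at hj
            by_cases hjr : j ∈ rest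
            · have := Hhead j hjr; unfold pvLex at this; dsimp only at this
              rcases this with h1 | h2
              · exact h1
              · omega
            · have hne : j ≠ h := by omega
              rw [H4 j hj.1 hj.2 (by simp [hne, hjr])]
              omega
        rw [pvLoopA, dif_pos hs', hmin]
        rw [pvLoopB, if_neg hs]
        dsimp only
        have hap : ¬ min surplus (M - v0) ≤ 0 := by omega
        rw [if_neg hap, dif_neg hap]
        set aj := min surplus (M - v0) with haj
        set alloc' := PySem.List.pySetD alloc h (v0 + aj) with halloc'
        have hlen' : (alloc'.length : Int) = (alloc.length : Int) := by
          rw [halloc', PySem.List.length_pySetD]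
        have hget' : ∀ j : Int, 0 ≤ j →
            PySem.List.pyGetD alloc' j 0 = if j = h then v0 + aj else PySem.List.pyGetD alloc j 0 :=
          fun j hj => pvGetSet alloc h j (v0 + aj) hh.1 hh.2 hj
        by_cases hfill : surplus ≤ M - v0
        · -- surplus exhausted: both loops stop now
          have : surplus - aj = 0 := by omega
          rw [this, pvLoopB_nonpos M rest alloc' 0 (by omega), pvLoopA, dif_neg (by omega)]
        · -- h filled to M exactly; recurse with the invariants re-established
          have haje : aj = M - v0 := by omega
          apply ih alloc' (surplus - aj)
          · intro i hi; have := H1 i (List.mem_cons_of_mem _ hi); omega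
          · exact Hnodup
          · refine Hrest.imp_of_mem ?_
            intro a b ha hb hab
            have hna : a ≠ h := fun e => hnotin (e ▸ ha)
            have hnb : b ≠ h := fun e => hnotin (e ▸ hb)
            have h0a := (H1 a (List.mem_cons_of_mem _ ha)).1
            have h0b := (H1 b (List.mem_cons_of_mem _ hb)).1
            unfold pvLex at hab ⊢
            dsimp only at hab ⊢
            rw [hget' a h0a, hget' b h0b, if_neg hna, if_neg hnb]
            exact hab
          · intro j hj0 hjn hjr
            rw [hget' j hj0]
            by_cases hjh : j = h
            · rw [if_pos hjh]; omega
            · rw [if_neg hjh]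
              exact H4 j hj0 (by omega) (by simp [hjh, hjr])
          · intro i hi0 hin
            rw [hget' i hi0]
            by_cases hih : i = h
            · rw [if_pos hih]; omega
            · rw [if_neg hih]; exact H5 i hi0 (by omega)
      · -- v0 = M: every bin is already full, both sides stop
        have hv0M : v0 = M := le_antisymm (H5 h hh.1 hh.2) (by omega)
        rw [pvLoopB, if_neg hs]
        dsimp only
        rw [if_pos (by rw [← hv0, hv0M]; omega)]
        rw [pvLoopA, dif_pos hs']
        cases hm : PySem.List.min? (PySem.List.pyRange 0 alloc.length 1)
            (fun i => PySem.List.pyGetD alloc i 0) with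
        | none => rfl
        | some m =>
          have hmem := PySem.List.min?_mem hm
          rw [PySem.List.mem_pyRange_one] at hmem
          have h1 : PySem.List.pyGetD alloc m 0 ≤ M := H5 m hmem.1 hmem.2
          have h2 : v0 ≤ PySem.List.pyGetD alloc m 0 := hval m hmem.1 hmem.2
          dsimp only
          rw [dif_pos (by omega : min surplus (M - PySem.List.pyGetD alloc m 0) ≤ 0)]

-- the capping for-loop computes (map (min · M), sum of the overshoots)
theorem pvCap_spec (M : Int) : ∀ (suf pre : List Int) (s : Int), (∀ v ∈ pre, True) →
    (PySem.List.pyRange (pre.length : Int) ((pre.length : Int) + (suf.length : Int)) 1).foldl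
      (pvCapA M) (pre ++ suf, s)
    = (pre ++ suf.map (fun x => min x M),
       s + ((suf.filter (fun x => decide (M < x))).map (fun x => x - M)).sum) := by
  intro suf
  induction suf with
  | nil =>
    intro pre s _
    simp only [List.length_nil, Nat.cast_zero, add_zero, List.map_nil, List.append_nil,
      List.filter_nil, List.sum_nil]
    rw [PySem.List.pyRange_one_eq_nil (le_refl _)]
    simp
  | cons x t ih =>
    intro pre s _
    have hlt : (pre.length : Int) < (pre.length : Int) + ((x :: t).length : Int) := by
      simp
    rw [PySem.List.pyRange_one_cons hlt, List.foldl_cons]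
    have hget : PySem.List.pyGetD (pre ++ x :: t) (pre.length : Int) 0 = x := by
      rw [PySem.List.pyGetD_eq_getElem _ _ (by omega) (by simp)]
      simp
    by_cases hx : M < x
    · have hstep : pvCapA M (pre ++ x :: t, s) (pre.length : Int)
          = ((pre ++ [M]) ++ t, s + (x - M)) := by
        unfold pvCapA
        rw [hget, if_pos (by omega)]
        rw [PySem.List.pySetD_of_nonneg (pre ++ x :: t) M (Int.natCast_nonneg _)]
        rw [Int.toNat_natCast]
        rw [show (pre ++ x :: t).set pre.length M = (pre ++ [M]) ++ t by
          rw [List.set_append_right _ _ (le_refl _)]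
          simp]
      rw [hstep]
      have hlen : ((pre ++ [M]).length : Int) = (pre.length : Int) + 1 := by simp
      have := ih (pre ++ [M]) (s + (x - M)) (fun _ _ => trivial)
      rw [hlen] at this
      rw [show (pre.length : Int) + ((x :: t).length : Int)
            = (pre.length : Int) + 1 + (t.length : Int) by simp; omega]
      rw [this]
      have hmin : min x M = M := by omega
      simp [hx, hmin, List.append_assoc]
      ring
    · have hstep : pvCapA M (pre ++ x :: t, s) (pre.length : Int) = ((pre ++ [x]) ++ t, s) := by
        unfold pvCapA
        rw [hget, if_neg (by omega)]
        simp
      rw [hstep]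
      have hlen : ((pre ++ [x]).length : Int) = (pre.length : Int) + 1 := by simp
      have := ih (pre ++ [x]) s (fun _ _ => trivial)
      rw [hlen] at this
      rw [show (pre.length : Int) + ((x :: t).length : Int)
            = (pre.length : Int) + 1 + (t.length : Int) by simp; omega]
      rw [this]
      have hmin : min x M = x := by omega
      simp [hx, hmin, List.append_assoc]

-- ===== VERDICT (by name: the statement is the Claim_ definition above) =====
theorem appliquer_contrainte_physique_spec : Claim_equal_appliquer_contrainte_physique := by
  unfold Claim_equal_appliquer_contrainte_physique
  intro alloc M _
  unfold Spec_appliquer_contrainte_physique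
  unfold appliquer_contrainte_physique appliquer_contrainte_physique_alt
  have hcap := pvCap_spec M alloc [] 0 (fun _ _ => trivial)
  simp only [List.nil_append, List.length_nil, Nat.cast_zero, zero_add] at hcap
  rw [hcap]
  dsimp only
  set capped := alloc.map (fun x => min x M) with hcapped
  set surplus := ((alloc.filter (fun x => decide (M < x))).map (fun x => x - M)).sum with hsurplus
  set order := PySem.List.sorted2 (PySem.List.pyRange 0 (capped.length : Int) 1)
      (fun i => PySem.List.pyGetD capped i 0) (fun i => i) false with horder
  have hperm : order.Perm (PySem.List.pyRange 0 (capped.length : Int) 1) :=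
    PySem.List.sorted2_perm _ _ _ _
  have hmemo : ∀ i, i ∈ order ↔ (0 ≤ i ∧ i < (capped.length : Int)) := by
    intro i
    rw [hperm.mem_iff, PySem.List.mem_pyRange_one]
  apply pvLoop_eq
  · intro i hi; exact (hmemo i).mp hi
  · exact hperm.nodup_iff.mpr (PySem.List.nodup_pyRange_one 0 _)
  · exact pvSorted2_pairwise _ _
  · intro j hj0 hjn hjo
    exact absurd ((hmemo j).mpr ⟨hj0, hjn⟩) hjo
  · intro i hi0 hin
    rw [PySem.List.pyGetD_eq_getElem _ _ hi0 hin]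
    simp only [hcapped, List.getElem_map]
    exact min_le_right _ _
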